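-- pv_equiv track=rewrite | github.com/truongphillipthanh/syncrescendence | corpus/uncategorized/09236.py | current_phase
-- ===== SOURCE A (Python) =====
-- def current_phase(phases: list) -> dict:
--     """Determine the current active phase."""
--     for p in phases:
--         if p["status"] == "IN PROGRESS":
--             return p
--     # If none in progress, find the first non-DONE
--     for p in phases:
--         if p["status"] != "DONE":
--             return p
--     # All done
--     if phases:
--         return phases[-1]
--     return {"id": "?", "title": "Unknown", "status": "Unknown"}
-- ===== SOURCE B (Python) =====
-- def current_phase(phases: list) -> dict:
--     """Determine the current active phase (single pass)."""
--     first_non_done = None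
--     for p in phases:
--         s = p["status"]
--         if s == "IN PROGRESS":
--             return p
--         if first_non_done is None and s != "DONE":
--             first_non_done = p
--     if first_non_done is not None:
--         return first_non_done
--     if phases:
--         return phases[-1]
--     return {"id": "?", "title": "Unknown", "status": "Unknown"}
-- ===== Notes on version B (the rewrite author's own statement) =====
-- stated objective: alternative
-- what changed: Replaces A's two sequential scans (one for IN PROGRESS, one for non-DONE) with a single pass that returns immediately on IN PROGRESS and otherwise remembers the first non-DONE candidate.
import Mathlib
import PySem

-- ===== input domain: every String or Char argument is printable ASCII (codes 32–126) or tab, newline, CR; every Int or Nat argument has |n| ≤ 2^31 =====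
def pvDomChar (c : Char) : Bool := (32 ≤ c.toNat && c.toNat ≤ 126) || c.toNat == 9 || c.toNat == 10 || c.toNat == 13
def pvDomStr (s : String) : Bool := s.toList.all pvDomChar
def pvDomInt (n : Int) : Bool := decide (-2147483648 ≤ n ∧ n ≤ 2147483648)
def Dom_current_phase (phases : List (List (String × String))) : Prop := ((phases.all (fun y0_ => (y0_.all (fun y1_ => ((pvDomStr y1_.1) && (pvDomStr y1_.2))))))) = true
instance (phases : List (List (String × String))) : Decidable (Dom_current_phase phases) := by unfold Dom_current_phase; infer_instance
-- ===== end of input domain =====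

-- B replaces A's two sequential scans by one pass that tracks the first non-DONE candidate;
-- the equivalence proved is about the return value (neither version mutates its argument).

-- p["status"]: first-match lookup in the association list (none = Python KeyError, excluded by Pre_)
def statusOf (p : List (String × String)) : Option String :=
  (p.find? (fun kv => kv.1 == "status")).map (·.2)

def defaultPhase : List (String × String) :=
  [("id", "?"), ("title", "Unknown"), ("status", "Unknown")]

-- ===== PORT A =====
-- first loop: first phase whose status is "IN PROGRESS"
-- second loop: first phase whose status is not "DONE"
def current_phase (phases : List (List (String × String))) : List (String × String) :=
  match phases.find? (fun p => statusOf p == some "IN PROGRESS") with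
  | some p => p
  | none =>
    match phases.find? (fun p => statusOf p != some "DONE") with
    | some p => p
    | none =>
      match phases.getLast? with
      | some p => p
      | none => defaultPhase

-- ===== PORT B =====
-- single pass: return on IN PROGRESS, else remember the first non-DONE candidate
def altLoop (rest : List (List (String × String))) (cand : Option (List (String × String)))
    (phases : List (List (String × String))) : List (String × String) :=
  match rest with
  | [] =>
    match cand with
    | some c => c
    | none =>
      match phases.getLast? with
      | some p => p
      | none => defaultPhase
  | p :: t =>
    let s := statusOf p
    if s == some "IN PROGRESS" then p
    else if cand.isNone && s != some "DONE" then altLoop t (some p) phases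
    else altLoop t cand phases

def current_phase_alt (phases : List (List (String × String))) : List (String × String) :=
  altLoop phases none phases

-- ===== PRECONDITION & SPEC =====
-- Pre_ excludes exactly the inputs on which the Python raises KeyError: a phase with no
-- "status" key that is reached before (or at the point where) an IN PROGRESS phase stops the scan.
def Pre_current_phase (phases : List (List (String × String))) : Prop :=
  ∀ j < phases.length,
    (((phases.getD j []).find? (fun kv => kv.1 == "status")).isNone = true →
      ∃ i < j, ((phases.getD i []).find? (fun kv => kv.1 == "status")).map (·.2) = some "IN PROGRESS")
instance (phases : List (List (String × String))) : Decidable (Pre_current_phase phases) := by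
  unfold Pre_current_phase; infer_instance

def pvWitness_current_phase : (List (List (String × String))) :=
  [[("status", "DONE")], [("status", "TODO"), ("id", "1")]]

def Spec_current_phase (phases : List (List (String × String))) (out : List (String × String)) : Prop := out = current_phase_alt phases
instance (phases : List (List (String × String))) (out : List (String × String)) : Decidable (Spec_current_phase phases out) := by unfold Spec_current_phase; infer_instance

-- ===== CLAIM (what is proved, stated in full; the proofs are below) =====
def Claim_equal_current_phase : Prop := ∀ (phases : List (List (String × String))), Dom_current_phase phases → Pre_current_phase phases → Spec_current_phase phases (current_phase phases)

-- ===== LEMMAS AND PROOFS =====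

-- Loop invariant: the single pass with candidate `cand` computes A's cascade restricted to `rest`.
theorem altLoop_eq (rest : List (List (String × String)))
    (cand : Option (List (String × String))) (phases : List (List (String × String))) :
    altLoop rest cand phases =
      match rest.find? (fun p => statusOf p == some "IN PROGRESS") with
      | some p => p
      | none =>
        match cand with
        | some c => c
        | none =>
          match rest.find? (fun p => statusOf p != some "DONE") with
          | some p => p
          | none =>
            match phases.getLast? with
            | some p => p
            | none => defaultPhase := by
  induction rest generalizing cand with
  | nil => cases cand <;> simp [altLoop, List.find?]
  | cons p t ih =>
    by_cases hip : (statusOf p == some "IN PROGRESS") = true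
    · simp [altLoop, List.find?, hip]
    · rw [Bool.not_eq_true] at hip
      cases cand with
      | some c =>
        simp only [altLoop, List.find?, hip]
        rw [ih (some c)]
        simp [hip]
      | none =>
        by_cases hnd : (statusOf p != some "DONE") = true
        · simp only [altLoop, List.find?, hip, hnd, Option.isNone_none, Bool.true_and, if_true,
            if_false]
          rw [ih (some p)]
          simp [hip, hnd]
        · rw [Bool.not_eq_true] at hnd
          simp only [altLoop, List.find?, hip, hnd, Option.isNone_none, Bool.true_and, if_false]
          rw [ih none]
          simp [hip, hnd]

-- ===== VERDICT (by name: the statement is the Claim_ definition above) =====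
theorem current_phase_spec : Claim_equal_current_phase := by
  intro phases _ _
  unfold Spec_current_phase current_phase_alt current_phase
  rw [altLoop_eq]
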